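-- pv_equiv track=rewrite | github.com/hojoungjang/programming-exercises | 2240-자두나무/solution.py | solution
-- ===== SOURCE A (Python) =====
-- def solution(t, w, plums):
--     tree1 = [0 for _ in range(w+1)]
--     tree2 = [0 for _ in range(w+1)]
--     first_tree2 = True
--     plums = [1] + plums
--
--     for i in range(1, t + 1):
--         if plums[i] == 1:
--             for j in range(w+1):
--                 tree1[j] = tree1[j] + 1
--                 if j > 0:
--                     tree1[j] = max(tree1[j], tree2[j-1] + 1)
--         else:
--             for j in range(w+1):
--                 if not first_tree2:
--                     tree2[j] = tree2[j] + 1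
--                 if j > 0:
--                     tree2[j] = max(tree2[j], tree1[j-1] + 1)
--             first_tree2 = False
--
--     return max(max(tree1), max(tree2))
-- ===== SOURCE B (Python) =====
-- def solution(t, w, plums):
--     n = max(t, 0)
--     ps = plums[:n]
--     best = 0
--     prev1, prev2 = [], []
--     for j in range(w + 1):
--         c1, c2 = [0], [0]
--         l1 = l2 = 0
--         seen2 = False
--         for i, p in enumerate(ps):
--             if p == 1:
--                 v1 = l1 + 1
--                 if j > 0:
--                     v1 = max(v1, prev2[i] + 1)
--                 c1.append(v1)
--                 c2.append(l2)
--                 l1 = v1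
--             else:
--                 v2 = l2 + (1 if seen2 else 0)
--                 if j > 0:
--                     v2 = max(v2, prev1[i] + 1)
--                 c1.append(l1)
--                 c2.append(v2)
--                 l2 = v2
--                 seen2 = True
--         best = max(best, l1, l2)
--         prev1, prev2 = c1, c2
--     return best
-- ===== Notes on version B (the rewrite author's own statement) =====
-- stated objective: alternative
-- what changed: Transposed the DP: instead of A's time-outer loop over two move-indexed arrays with an in-place first_tree2 flag, B loops moves-outer / time-inner, streaming one pair of time-indexed columns per move count with a running maximum, recomputing the seen-a-tree-2-plum flag per column and enumerating a truncated copy of plums instead of indexing a sentinel-prepended list.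
import Mathlib
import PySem

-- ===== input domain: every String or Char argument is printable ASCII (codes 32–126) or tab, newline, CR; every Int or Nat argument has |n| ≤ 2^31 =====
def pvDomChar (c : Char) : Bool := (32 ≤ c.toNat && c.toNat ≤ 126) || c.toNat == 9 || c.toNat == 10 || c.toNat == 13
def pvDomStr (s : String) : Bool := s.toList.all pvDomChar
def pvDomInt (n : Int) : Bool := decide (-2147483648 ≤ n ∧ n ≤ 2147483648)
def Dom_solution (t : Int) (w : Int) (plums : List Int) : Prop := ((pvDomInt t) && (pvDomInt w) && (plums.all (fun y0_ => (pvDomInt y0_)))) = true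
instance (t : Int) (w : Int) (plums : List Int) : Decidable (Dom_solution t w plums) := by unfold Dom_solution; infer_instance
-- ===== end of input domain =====

-- ===== PORT A =====
-- B re-implements A with the DP transposed (moves-outer, time-inner); return values proved equal on Pre_.
-- Port note (A): the j-loop mutates tree1 (resp. tree2) in place, but iteration j writes only index j and
-- reads only index j of the same array and index j-1 of the OTHER (unmodified) array, so the pass is
-- exactly this per-index rebuild of the array; reads tree1[j]/tree2[j-1] are always in range (j from
-- range(w+1)), ported as pyGetD with default 0; plums[i] is in range under Pre_ (t ≤ len(plums)).
def solution (t : Int) (w : Int) (plums : List Int) : Int :=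
  let tree1 : List Int := (PySem.List.pyRange 0 (w+1) 1).map (fun _ => (0:Int))
  let tree2 : List Int := (PySem.List.pyRange 0 (w+1) 1).map (fun _ => (0:Int))
  let plums1 : List Int := 1 :: plums
  let st :=
    (PySem.List.pyRange 1 (t+1) 1).foldl (fun (st : List Int × List Int × Bool) i =>
      if PySem.List.pyGetD plums1 i 0 == 1 then
        ((PySem.List.pyRange 0 (w+1) 1).map (fun j =>
            let v := PySem.List.pyGetD st.1 j 0 + 1
            if 0 < j then max v (PySem.List.pyGetD st.2.1 (j-1) 0 + 1) else v),
         st.2.1, st.2.2)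
      else
        (st.1,
         (PySem.List.pyRange 0 (w+1) 1).map (fun j =>
            let v := PySem.List.pyGetD st.2.1 j 0 + (if st.2.2 then 0 else 1)
            if 0 < j then max v (PySem.List.pyGetD st.1 (j-1) 0 + 1) else v),
         false))
      (tree1, tree2, true)
  -- max(list) raises on an empty list; under Pre_ (0 ≤ w) both arrays are nonempty
  max ((PySem.List.max? st.1 (fun x => x)).getD 0) ((PySem.List.max? st.2.1 (fun x => x)).getD 0)

-- ===== PORT B =====
-- state s = (c1, c2, l1, l2, seen2) as in Source B; prev1/prev2 reads (pyGetD) occur only when 0 < j, in range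
def solution_alt (t : Int) (w : Int) (plums : List Int) : Int :=
  let n : Int := max t 0
  let ps := PySem.List.slice plums none (some n)
  let res :=
    (PySem.List.pyRange 0 (w+1) 1).foldl (fun (st : Int × List Int × List Int) j =>
      let col :=
        (PySem.List.enumerate ps 0).foldl
          (fun (s : List Int × List Int × Int × Int × Bool) ip =>
            if ip.2 == 1 then
              let v1 := if 0 < j then max (s.2.2.1 + 1) (PySem.List.pyGetD st.2.2 ip.1 0 + 1)
                        else s.2.2.1 + 1
              (s.1 ++ [v1], s.2.1 ++ [s.2.2.2.1], v1, s.2.2.2.1, s.2.2.2.2)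
            else
              let v2 := if 0 < j then max (s.2.2.2.1 + (if s.2.2.2.2 then 1 else 0)) (PySem.List.pyGetD st.2.1 ip.1 0 + 1)
                        else s.2.2.2.1 + (if s.2.2.2.2 then 1 else 0)
              (s.1 ++ [s.2.2.1], s.2.1 ++ [v2], s.2.2.1, v2, true))
          ([0], [0], 0, 0, false)
      (max (max st.1 col.2.2.1) col.2.2.2.1, col.1, col.2.1)
    ) (0, [], [])
  res.1

-- ===== PRECONDITION & SPEC =====
-- Pre_ is exactly the set of inputs where Python A returns: w ≥ 0 (else max([]) raises ValueError) and
-- t ≤ len(plums) (else plums[i] raises IndexError; t ≤ 0 is fine, the loop is empty).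
def Pre_solution (t : Int) (w : Int) (plums : List Int) : Prop :=
  0 ≤ w ∧ t ≤ (plums.length : Int)
instance (t : Int) (w : Int) (plums : List Int) : Decidable (Pre_solution t w plums) := by
  unfold Pre_solution; infer_instance
def pvWitness_solution : Int × Int × List Int := (3, 2, [2, 1, 2])

def Spec_solution (t : Int) (w : Int) (plums : List Int) (out : Int) : Prop := out = solution_alt t w plums
instance (t : Int) (w : Int) (plums : List Int) (out : Int) : Decidable (Spec_solution t w plums out) := by unfold Spec_solution; infer_instance

-- ===== CLAIM (what is proved, stated in full; the proofs are below) =====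
def Claim_equal_solution : Prop := ∀ (t : Int) (w : Int) (plums : List Int), Dom_solution t w plums → Pre_solution t w plums → Spec_solution t w plums (solution t w plums)
-- ===== LEMMAS AND PROOFS =====

-- the common spec table: pvTbl ps i j = (tree1-value, tree2-value) of the DP cell after i time steps with
-- move budget j (A fills it time-major, B move-major)
def pvSeen (ps : List Int) (K : Nat) : Bool := (ps.take K).any (fun x => x != 1)

def pvTbl (ps : List Int) : Nat → Nat → Int × Int
  | 0, _ => (0, 0)
  | i+1, j =>
    let cur := pvTbl ps i j
    if ps.getD i 0 == 1 then
      (if 0 < j then max (cur.1 + 1) ((pvTbl ps i (j-1)).2 + 1) else cur.1 + 1, cur.2)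
    else
      (cur.1,
       if 0 < j then max (cur.2 + (if pvSeen ps i then 1 else 0)) ((pvTbl ps i (j-1)).1 + 1)
       else cur.2 + (if pvSeen ps i then 1 else 0))

lemma pvTbl_nonneg (ps : List Int) : ∀ i j, 0 ≤ (pvTbl ps i j).1 ∧ 0 ≤ (pvTbl ps i j).2 := by
  intro i
  induction i with
  | zero => intro j; simp [pvTbl]
  | succ i ih =>
    intro j
    obtain ⟨a1, a2⟩ := ih j
    obtain ⟨b1, b2⟩ := ih (j-1)
    simp only [pvTbl]
    split_ifs <;> refine ⟨?_, ?_⟩ <;> dsimp only <;> omega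

lemma pvSeen_succ (ps : List Int) (K : Nat) (hK : K < ps.length) :
    pvSeen ps (K+1) = (pvSeen ps K || ps.getD K 0 != 1) := by
  unfold pvSeen
  have h := List.take_add_one (l := ps) (i := K)
  rw [List.getElem?_eq_getElem hK] at h
  rw [h, List.getD_eq_getElem?_getD, List.getElem?_eq_getElem hK]
  simp only [Option.toList_some, List.any_append, List.any_cons, List.any_nil, Option.getD_some,
    Bool.or_false]

lemma foldl_max_init (a : Int) : ∀ (l : List Int) (b : Int), l.foldl max (max a b) = max a (l.foldl max b)
  | [], _ => rfl
  | x :: l, b => by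
    simp only [List.foldl_cons, max_assoc]
    exact foldl_max_init a l (max b x)

lemma fold_two_max (a b : Nat → Int) :
    ∀ W, max (((List.range W).map a).foldl max 0) (((List.range W).map b).foldl max 0)
      = (List.range W).foldl (fun acc m => max (max acc (a m)) (b m)) 0
  | 0 => by simp
  | W+1 => by
    have ih := fold_two_max a b W
    simp only [List.range_succ, List.map_append, List.foldl_append, List.map_cons, List.map_nil,
      List.foldl_cons, List.foldl_nil]
    rw [← ih]
    omega

-- ========== A side ==========

lemma A_fold (w : Int) (plums : List Int) (N : Nat) (hN : N ≤ plums.length) :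
    ∀ K, K ≤ N →
    ((List.range K).map (fun k : Nat => (1:Int) + k)).foldl
      (fun (st : List Int × List Int × Bool) i =>
        if PySem.List.pyGetD ((1:Int) :: plums) i 0 == 1 then
          ((PySem.List.pyRange 0 (w+1) 1).map (fun j =>
              let v := PySem.List.pyGetD st.1 j 0 + 1
              if 0 < j then max v (PySem.List.pyGetD st.2.1 (j-1) 0 + 1) else v),
           st.2.1, st.2.2)
        else
          (st.1,
           (PySem.List.pyRange 0 (w+1) 1).map (fun j =>
              let v := PySem.List.pyGetD st.2.1 j 0 + (if st.2.2 then 0 else 1)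
              if 0 < j then max v (PySem.List.pyGetD st.1 (j-1) 0 + 1) else v),
           false))
      ((PySem.List.pyRange 0 (w+1) 1).map (fun j => (pvTbl (plums.take N) 0 j.toNat).1),
       (PySem.List.pyRange 0 (w+1) 1).map (fun j => (pvTbl (plums.take N) 0 j.toNat).2),
       true)
    = ((PySem.List.pyRange 0 (w+1) 1).map (fun j => (pvTbl (plums.take N) K j.toNat).1),
       (PySem.List.pyRange 0 (w+1) 1).map (fun j => (pvTbl (plums.take N) K j.toNat).2),
       !pvSeen (plums.take N) K) := by
  intro K
  induction K with
  | zero => intro _; simp [pvSeen]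
  | succ K ih =>
    intro hK1
    have hKN : K < N := by omega
    have ihv := ih (by omega)
    rw [List.range_succ, List.map_append, List.foldl_append, ihv]
    set ps := plums.take N with hps
    have hlen : ps.length = N := by simp [hps]; omega
    have hKlen : K < ps.length := by omega
    have hidx : PySem.List.pyGetD ((1:Int) :: plums) (1 + (K:Int)) 0 = ps.getD K 0 := by
      have h1 : (1 + (K:Int)) = ((K+1 : Nat) : Int) := by push_cast; ring
      rw [h1, PySem.List.pyGetD_natCast, List.getD_cons_succ, hps,
        List.getD_eq_getElem?_getD, List.getD_eq_getElem?_getD, List.getElem?_take_of_lt hKN]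
    simp only [List.map_cons, List.map_nil, List.foldl_cons, List.foldl_nil, hidx]
    have hseen := pvSeen_succ ps K hKlen
    by_cases hp : ps.getD K 0 = 1
    · have hp2 : ps[K]?.getD 0 = 1 := by rwa [List.getD_eq_getElem?_getD] at hp
      have hb : (ps.getD K 0 == 1) = true := by simp [hp2]
      rw [if_pos hb]
      refine congrArg₂ _ ?_ (congrArg₂ _ ?_ ?_)
      · apply List.map_congr_left
        intro j hj
        obtain ⟨hj0, hjw⟩ := PySem.List.mem_pyRange_one.mp hj
        have g1 := PySem.List.pyGetD_map_pyRange_of_nonneg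
          (fun j => (pvTbl ps K j.toNat).1) (w+1) j 0 hj0 hjw
        simp only [g1]
        by_cases hjpos : 0 < j
        · have g2 := PySem.List.pyGetD_map_pyRange_of_nonneg
            (fun j => (pvTbl ps K j.toNat).2) (w+1) (j-1) 0 (by omega) (by omega)
          have hnat : (j-1).toNat = j.toNat - 1 := by omega
          have hjn : 0 < j.toNat := by omega
          simp only [if_pos hjpos, g2, hnat, pvTbl, hb, if_pos hjn]
          simp [if_pos hjn] <;> try exact hp2
        · have hjz : j = 0 := by omega
          subst hjz
          simp [pvTbl, hb, hp2] <;> try exact hp2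
      · apply List.map_congr_left
        intro j _
        simp [pvTbl, hb, hp2] <;> try exact hp2
      · rw [hseen]
        simp [hp, hp2] <;> try exact hp2
    · have hp2 : ¬ ps[K]?.getD 0 = 1 := by rwa [List.getD_eq_getElem?_getD] at hp
      have hb : (ps.getD K 0 == 1) = false := by simp [hp2]
      rw [if_neg (by simp [hp2])]
      refine congrArg₂ _ ?_ (congrArg₂ _ ?_ ?_)
      · apply List.map_congr_left
        intro j _
        simp [pvTbl, hb, hp2] <;> try exact hp2
      · apply List.map_congr_left
        intro j hj
        obtain ⟨hj0, hjw⟩ := PySem.List.mem_pyRange_one.mp hj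
        have g1 := PySem.List.pyGetD_map_pyRange_of_nonneg
          (fun j => (pvTbl ps K j.toNat).2) (w+1) j 0 hj0 hjw
        simp only [g1]
        by_cases hjpos : 0 < j
        · have g2 := PySem.List.pyGetD_map_pyRange_of_nonneg
            (fun j => (pvTbl ps K j.toNat).1) (w+1) (j-1) 0 (by omega) (by omega)
          have hnat : (j-1).toNat = j.toNat - 1 := by omega
          have hjn : 0 < j.toNat := by omega
          simp only [if_pos hjpos, g2, hnat, pvTbl, hb, if_pos hjn]
          cases hsv : pvSeen ps K <;> simp [hp2, if_pos hjn, hsv] <;> try exact hp2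
        · have hjz : j = 0 := by omega
          subst hjz
          cases hsv : pvSeen ps K <;> simp [pvTbl, hb, hp2, hsv] <;> try exact hp2
      · rw [hseen]
        simp [hp, hp2] <;> try exact hp2

-- ========== B side ==========

lemma B_col (j : Int) (hj0 : 0 ≤ j) (ps prev1 prev2 : List Int)
    (hprev : 0 < j →
      prev1 = (List.range (ps.length+1)).map (fun i => (pvTbl ps i (j.toNat - 1)).1) ∧
      prev2 = (List.range (ps.length+1)).map (fun i => (pvTbl ps i (j.toNat - 1)).2)) :
    ∀ K, K ≤ ps.length →
    ((List.range K).map (fun k : Nat => ((k:Int), PySem.List.pyGetD ps (k:Int) 0))).foldl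
      (fun (s : List Int × List Int × Int × Int × Bool) ip =>
        if ip.2 == 1 then
          let v1 := if 0 < j then max (s.2.2.1 + 1) (PySem.List.pyGetD prev2 ip.1 0 + 1)
                    else s.2.2.1 + 1
          (s.1 ++ [v1], s.2.1 ++ [s.2.2.2.1], v1, s.2.2.2.1, s.2.2.2.2)
        else
          let v2 := if 0 < j then max (s.2.2.2.1 + (if s.2.2.2.2 then 1 else 0)) (PySem.List.pyGetD prev1 ip.1 0 + 1)
                    else s.2.2.2.1 + (if s.2.2.2.2 then 1 else 0)
          (s.1 ++ [s.2.2.1], s.2.1 ++ [v2], s.2.2.1, v2, true))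
      ([0], [0], 0, 0, false)
    = ((List.range (K+1)).map (fun i => (pvTbl ps i j.toNat).1),
       (List.range (K+1)).map (fun i => (pvTbl ps i j.toNat).2),
       (pvTbl ps K j.toNat).1, (pvTbl ps K j.toNat).2, pvSeen ps K) := by
  intro K
  induction K with
  | zero => intro _; simp [pvTbl, pvSeen]
  | succ K ih =>
    intro hK1
    have hKlen : K < ps.length := by omega
    rw [List.range_succ, List.map_append, List.foldl_append, ih (by omega)]
    simp only [List.map_cons, List.map_nil, List.foldl_cons, List.foldl_nil,
      PySem.List.pyGetD_natCast]
    have hseen := pvSeen_succ ps K hKlen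
    by_cases hp : ps.getD K 0 = 1
    · have hp2 : ps[K]?.getD 0 = 1 := by rwa [List.getD_eq_getElem?_getD] at hp
      have hb : (ps.getD K 0 == 1) = true := by simp [hp2]
      rw [if_pos hb]
      by_cases hjpos : 0 < j
      · obtain ⟨hq1, hq2⟩ := hprev hjpos
        have hjn : 0 < j.toNat := by omega
        have g2 : prev2[K]?.getD 0 = (pvTbl ps K (j.toNat - 1)).2 := by
          rw [hq2, ← List.getD_eq_getElem?_getD, PySem.List.getD_map_range _ _ _ _ (by omega)]
        simp [if_pos hjpos, g2, List.range_succ, pvTbl, hp2, hjn, hseen, hp]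
      · have hjz : j.toNat = 0 := by omega
        simp [if_neg hjpos, List.range_succ, pvTbl, hp2, hjz, hseen, hp]
    · have hp2 : ¬ ps[K]?.getD 0 = 1 := by rwa [List.getD_eq_getElem?_getD] at hp
      have hb : (ps.getD K 0 == 1) = false := by simp [hp2]
      rw [if_neg (by simp [hp2])]
      by_cases hjpos : 0 < j
      · obtain ⟨hq1, hq2⟩ := hprev hjpos
        have hjn : 0 < j.toNat := by omega
        have g1 : prev1[K]?.getD 0 = (pvTbl ps K (j.toNat - 1)).1 := by
          rw [hq1, ← List.getD_eq_getElem?_getD, PySem.List.getD_map_range _ _ _ _ (by omega)]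
        cases hsv : pvSeen ps K <;>
          simp [if_pos hjpos, g1, List.range_succ, pvTbl, hp2, hjn, hseen, hp, hsv]
      · have hjz : j.toNat = 0 := by omega
        cases hsv : pvSeen ps K <;>
          simp [if_neg hjpos, List.range_succ, pvTbl, hp2, hjz, hseen, hp, hsv]

lemma B_fold (ps : List Int) :
    ∀ M,
    ((List.range M).map (fun k : Nat => ((k:Int)))).foldl
      (fun (st : Int × List Int × List Int) j =>
        let col :=
          ((List.range ps.length).map (fun k : Nat => ((k:Int), PySem.List.pyGetD ps (k:Int) 0))).foldl
            (fun (s : List Int × List Int × Int × Int × Bool) ip =>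
              if ip.2 == 1 then
                let v1 := if 0 < j then max (s.2.2.1 + 1) (PySem.List.pyGetD st.2.2 ip.1 0 + 1)
                          else s.2.2.1 + 1
                (s.1 ++ [v1], s.2.1 ++ [s.2.2.2.1], v1, s.2.2.2.1, s.2.2.2.2)
              else
                let v2 := if 0 < j then max (s.2.2.2.1 + (if s.2.2.2.2 then 1 else 0)) (PySem.List.pyGetD st.2.1 ip.1 0 + 1)
                          else s.2.2.2.1 + (if s.2.2.2.2 then 1 else 0)
                (s.1 ++ [s.2.2.1], s.2.1 ++ [v2], s.2.2.1, v2, true))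
            ([0], [0], 0, 0, false)
        (max (max st.1 col.2.2.1) col.2.2.2.1, col.1, col.2.1))
      (0, [], [])
    = ((List.range M).foldl
        (fun acc m => max (max acc (pvTbl ps ps.length m).1) (pvTbl ps ps.length m).2) 0,
       match M with
       | 0 => ([], [])
       | m+1 => ((List.range (ps.length+1)).map (fun i => (pvTbl ps i m).1),
                 (List.range (ps.length+1)).map (fun i => (pvTbl ps i m).2))) := by
  intro M
  induction M with
  | zero => simp
  | succ M ih =>
    rw [List.range_succ, List.map_append, List.foldl_append, ih]
    simp only [List.map_cons, List.map_nil, List.foldl_cons, List.foldl_nil]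
    cases M with
    | zero =>
      have hcol := B_col ((0:Nat) : Int) (by omega) ps [] []
        (by intro h; exact absurd h (by norm_num)) ps.length (le_refl _)
      rw [hcol]
      norm_num [List.range_succ]
    | succ m =>
      have hcol := B_col (((m+1 : Nat)) : Int) (by positivity) ps
        ((List.range (ps.length+1)).map (fun i => (pvTbl ps i m).1))
        ((List.range (ps.length+1)).map (fun i => (pvTbl ps i m).2))
        (by intro _; constructor <;> simp) ps.length (le_refl _)
      rw [hcol]
      simp [List.range_succ]

-- ========== assembly ==========

lemma max_two_lists (f g : Nat → Int) (W : Nat) (hf : 0 ≤ f 0) (hg : 0 ≤ g 0) :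
    max (((List.range W).map (fun k => f (k+1))).foldl max (f 0))
        (((List.range W).map (fun k => g (k+1))).foldl max (g 0))
  = (List.range (W+1)).foldl (fun acc m => max (max acc (f m)) (g m)) 0 := by
  have h1 : ((List.range (W+1)).map f).foldl max 0
      = ((List.range W).map (fun k => f (k+1))).foldl max (f 0) := by
    rw [List.range_succ_eq_map, List.map_cons, List.foldl_cons, max_eq_right hf, List.map_map]
    simp [Function.comp_def, Nat.succ_eq_add_one]
  have h2 : ((List.range (W+1)).map g).foldl max 0
      = ((List.range W).map (fun k => g (k+1))).foldl max (g 0) := by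
    rw [List.range_succ_eq_map, List.map_cons, List.foldl_cons, max_eq_right hg, List.map_map]
    simp [Function.comp_def, Nat.succ_eq_add_one]
  rw [← fold_two_max f g (W+1), h1, h2]

lemma solution_alt_eq (t w : Int) (plums : List Int) (hw : 0 ≤ w) :
    solution_alt t w plums
      = (List.range (w.toNat+1)).foldl
          (fun acc m => max (max acc (pvTbl (plums.take t.toNat) (plums.take t.toNat).length m).1)
            (pvTbl (plums.take t.toNat) (plums.take t.toNat).length m).2) 0 := by
  unfold solution_alt
  dsimp only
  have hps : PySem.List.slice plums none (some (max t 0)) = plums.take t.toNat := by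
    rw [PySem.List.slice_to plums (le_max_right t 0)]
    congr 1
    omega
  have hw1 : (w + 1 - 0).toNat = w.toNat + 1 := by omega
  simp only [hps, PySem.List.enumerate_eq_map_pyRange (plums.take t.toNat) 0,
    PySem.List.pyRange_one, List.map_map, hw1]
  have hlen : ((PySem.List.len (plums.take t.toNat)) - 0).toNat = (plums.take t.toNat).length := by
    simp [PySem.List.len]
    omega
  simp only [hlen, zero_add, Function.comp_def]
  exact congrArg Prod.fst (B_fold (plums.take t.toNat) (w.toNat + 1))

lemma solution_eq (t w : Int) (plums : List Int) (hw : 0 ≤ w) (ht : t ≤ (plums.length : Int)) :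
    solution t w plums
      = (List.range (w.toNat+1)).foldl
          (fun acc m => max (max acc (pvTbl (plums.take t.toNat) (plums.take t.toNat).length m).1)
            (pvTbl (plums.take t.toNat) (plums.take t.toNat).length m).2) 0 := by
  unfold solution
  dsimp only
  have hN : t.toNat ≤ plums.length := by omega
  have hlen : (plums.take t.toNat).length = t.toNat := by
    rw [List.length_take]; omega
  have ht1 : (t + 1 - 1).toNat = t.toNat := by omega
  have hw1 : (w + 1 - 0).toNat = w.toNat + 1 := by omega
  have hinit1 : (PySem.List.pyRange 0 (w+1) 1).map (fun _ => (0:Int))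
      = (PySem.List.pyRange 0 (w+1) 1).map (fun j => (pvTbl (plums.take t.toNat) 0 j.toNat).1) := by
    apply List.map_congr_left; intro j _; simp [pvTbl]
  have hinit2 : (PySem.List.pyRange 0 (w+1) 1).map (fun _ => (0:Int))
      = (PySem.List.pyRange 0 (w+1) 1).map (fun j => (pvTbl (plums.take t.toNat) 0 j.toNat).2) := by
    apply List.map_congr_left; intro j _; simp [pvTbl]
  have hfold := A_fold w plums t.toNat hN t.toNat (le_refl _)
  rw [← hinit1, ← hinit2] at hfold
  rw [PySem.List.pyRange_one 1 (t+1), ht1, hfold]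
  have hconv1 : (PySem.List.pyRange 0 (w+1) 1).map
        (fun j => (pvTbl (plums.take t.toNat) t.toNat j.toNat).1)
      = (List.range (w.toNat+1)).map (fun k => (pvTbl (plums.take t.toNat) t.toNat k).1) := by
    rw [PySem.List.pyRange_one, List.map_map, hw1]
    simp [Function.comp_def]
  have hconv2 : (PySem.List.pyRange 0 (w+1) 1).map
        (fun j => (pvTbl (plums.take t.toNat) t.toNat j.toNat).2)
      = (List.range (w.toNat+1)).map (fun k => (pvTbl (plums.take t.toNat) t.toNat k).2) := by
    rw [PySem.List.pyRange_one, List.map_map, hw1]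
    simp [Function.comp_def]
  have hsplit : ∀ (f : Nat → Int), (List.range (w.toNat+1)).map f
      = f 0 :: (List.range w.toNat).map (fun k => f (k+1)) := by
    intro f
    rw [List.range_succ_eq_map, List.map_cons, List.map_map]
    simp [Function.comp_def, Nat.succ_eq_add_one]
  rw [hconv1, hconv2, hsplit, hsplit, PySem.List.max?_id_cons, PySem.List.max?_id_cons]
  simp only [Option.getD_some, hlen]
  exact max_two_lists (fun k => (pvTbl (plums.take t.toNat) t.toNat k).1)
    (fun k => (pvTbl (plums.take t.toNat) t.toNat k).2) w.toNat
    (pvTbl_nonneg (plums.take t.toNat) t.toNat 0).1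
    (pvTbl_nonneg (plums.take t.toNat) t.toNat 0).2

-- ===== VERDICT (by name: the statement is the Claim_ definition above) =====
theorem solution_spec : Claim_equal_solution := by
  intro t w plums _ hpre
  unfold Spec_solution
  obtain ⟨hw, ht⟩ := hpre
  rw [solution_eq t w plums hw ht, solution_alt_eq t w plums hw]
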